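-- pv_equiv track=rewrite | github.com/AlanQuille/machinelearningTasks | sqrt2.py | sqrt2
-- ===== SOURCE A (Python) =====
-- def sqrt2(its, prec):
--
--     # pold is the numerator at previous step, pnew is numerator at next step
--     pold = 1
--     pnew = 0
--
--     # qold is the denominator at previous step, qnew is denominator at next step
--     qold = 1
--     qnew = 0
--
--     # This calculates an approximation of sqrt(2) as a rational number
--     # with pnew and pold as numerators (in the next and previous step
--     # respectively) and qnew and qold as denominators (in the next and
--     # previous steps respectively) for its iterations
--     for i in range(0, its):
--
--         # This is the recursion algorithm, derived from
--         # the formula for continued fractions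
--         pnew = pold + 2*qold
--         qnew = pold + qold
--
--         # Make the new numerator and denominator
--         # equal the old numerator and denominator
--         # for the next step in the loop
--         pold = pnew
--         qold = qnew
--
--     # This appends the first digit of sqrt(2)
--     # to output_string (the string to be
--     # returned)
--     output_string = str(pnew // qnew) + "."
--
--     # This is the first step in the long division algorithm
--     # pnew is set to the remainder of pnew and qnew after
--     # division and multipled by ten for the first decimal
--     # place
--     pnew = (pnew % qnew) * 10
--
--     # This performs the long division algorithm for each decimal place
--     # (defined by prec) and appends the digits of sqrt(2)
--     # digit by digit to the output_string, which is returned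
--     # at the end of the function
--     for i in range(1, prec+1):
--         output_string += str(pnew//qnew)
--         pnew = (pnew % qnew) * 10
--
--     # This returns the string, which has prec decimal places
--     # of sqrt(2)
--     return output_string
-- ===== SOURCE B (Python) =====
-- def sqrt2(its, prec):
--     # Binary exponentiation of the Pell matrix [[1,2],[1,1]] instead of A's linear iteration.
--     def matmul(X, Y):
--         (a, b, c, d), (e, f, g, h) = X, Y
--         return (a*e + b*g, a*f + b*h, c*e + d*g, c*f + d*h)
--
--     R = (1, 0, 0, 1)
--     M = (1, 2, 1, 1)
--     n = its
--     while n > 0: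
--         if n & 1:
--             R = matmul(R, M)
--         M = matmul(M, M)
--         n >>= 1
--
--     p = R[0] + R[1]
--     q = R[2] + R[3]
--
--     out = str(p // q) + "."
--     r = (p % q) * 10
--     for _ in range(prec):
--         out += str(r // q)
--         r = (r % q) * 10
--     return out
-- ===== Notes on version B (the rewrite author's own statement) =====
-- stated objective: alternative
-- what changed: A's its-step linear Pell iteration is replaced by binary exponentiation of the 2x2 Pell matrix; the digit loop stays a long division, which dominates the runtime, so the measured end-to-end gain is small (~1.2x).
import Mathlib
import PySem

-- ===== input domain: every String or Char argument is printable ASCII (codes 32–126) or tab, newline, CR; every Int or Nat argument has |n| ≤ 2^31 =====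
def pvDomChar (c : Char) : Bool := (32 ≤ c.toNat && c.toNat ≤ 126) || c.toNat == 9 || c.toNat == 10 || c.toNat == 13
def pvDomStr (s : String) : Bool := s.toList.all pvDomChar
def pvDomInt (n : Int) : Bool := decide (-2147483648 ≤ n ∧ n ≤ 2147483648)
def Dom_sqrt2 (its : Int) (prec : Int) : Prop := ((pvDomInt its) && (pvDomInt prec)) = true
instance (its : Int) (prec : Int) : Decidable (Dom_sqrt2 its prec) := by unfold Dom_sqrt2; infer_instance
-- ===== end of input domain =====

-- B replaces A's its-step linear Pell iteration by binary exponentiation of the 2x2 Pell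
-- matrix (the digit loop is the same long division); equivalence of RETURN values on its ≥ 1.

-- ===== PORT A =====
-- shared tail: the long-division digit loop, identical lines in both Pythons
def pvDigits (q : Int) (out0 : String) (r0 : Int) (prec : Int) : String :=
  ((PySem.List.pyRange 1 (prec + 1) 1).foldl
    (fun (st : String × Int) _ =>
      (st.1 ++ PySem.Int.toStr (PySem.Int.floordiv st.2 q), (PySem.Int.mod st.2 q) * 10))
    (out0, r0)).1

def sqrt2 (its : Int) (prec : Int) : String :=
  let st := (PySem.List.pyRange 0 its 1).foldl
    (fun (st : Int × Int × Int × Int) _ =>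
      let pold := st.1; let qold := st.2.2.1
      let pnew := pold + 2 * qold
      let qnew := pold + qold
      (pnew, pnew, qnew, qnew))
    (1, 0, 1, 0)
  let pnew := st.2.1
  let qnew := st.2.2.2
  let output_string := PySem.Int.toStr (PySem.Int.floordiv pnew qnew) ++ "."
  let pnew := (PySem.Int.mod pnew qnew) * 10
  pvDigits qnew output_string pnew prec

-- ===== PORT B =====
def pvMatMul (X Y : Int × Int × Int × Int) : Int × Int × Int × Int :=
  (X.1 * Y.1 + X.2.1 * Y.2.2.1, X.1 * Y.2.1 + X.2.1 * Y.2.2.2,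
   X.2.2.1 * Y.1 + X.2.2.2 * Y.2.2.1, X.2.2.1 * Y.2.1 + X.2.2.2 * Y.2.2.2)

-- B's 'while n > 0: if n & 1: R = R*M; M = M*M; n >>= 1' (n : Nat since the loop only runs for n > 0)
def pvPowLoop (R M : Int × Int × Int × Int) (n : Nat) : Int × Int × Int × Int :=
  if n = 0 then R
  else pvPowLoop (if n % 2 = 1 then pvMatMul R M else R) (pvMatMul M M) (n / 2)

def sqrt2_alt (its : Int) (prec : Int) : String :=
  let R := pvPowLoop (1, 0, 0, 1) (1, 2, 1, 1) its.toNat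
  let p := R.1 + R.2.1
  let q := R.2.2.1 + R.2.2.2
  let out := PySem.Int.toStr (PySem.Int.floordiv p q) ++ "."
  let r := (PySem.Int.mod p q) * 10
  pvDigits q out r prec

-- ===== PRECONDITION & SPEC =====
-- Pre_ excludes exactly its ≤ 0, where A divides 0 by 0 (ZeroDivisionError)
def Pre_sqrt2 (its : Int) (prec : Int) : Prop := 1 ≤ its
instance (its : Int) (prec : Int) : Decidable (Pre_sqrt2 its prec) := by unfold Pre_sqrt2; infer_instance
def pvWitness_sqrt2 : Int × Int := (1, 1)


def Spec_sqrt2 (its : Int) (prec : Int) (out : String) : Prop := out = sqrt2_alt its prec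
instance (its : Int) (prec : Int) (out : String) : Decidable (Spec_sqrt2 its prec out) := by unfold Spec_sqrt2; infer_instance

-- ===== CLAIM (what is proved, stated in full; the proofs are below) =====
def Claim_equal_sqrt2 : Prop := ∀ (its : Int) (prec : Int), Dom_sqrt2 its prec → Pre_sqrt2 its prec → Spec_sqrt2 its prec (sqrt2 its prec)

-- ===== LEMMAS AND PROOFS =====

-- the plain linear recurrence (pold, qold) after n steps
def pvPell (n : Nat) : Int × Int :=
  match n with
  | 0 => (1, 1)
  | n + 1 => let pq := pvPell n; (pq.1 + 2 * pq.2, pq.1 + pq.2)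

-- naive matrix power, left-multiplying by M
def pvMPow (M : Int × Int × Int × Int) (n : Nat) : Int × Int × Int × Int :=
  match n with
  | 0 => (1, 0, 0, 1)
  | n + 1 => pvMatMul M (pvMPow M n)

theorem pvMatMul_assoc (X Y Z : Int × Int × Int × Int) :
    pvMatMul (pvMatMul X Y) Z = pvMatMul X (pvMatMul Y Z) := by
  obtain ⟨a, b, c, d⟩ := X; obtain ⟨e, f, g, h⟩ := Y; obtain ⟨i, j, k, l⟩ := Z
  simp [pvMatMul, Prod.ext_iff]; constructor <;> [ring; constructor <;> [ring; constructor <;> ring]]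

theorem pvMatMul_one (X : Int × Int × Int × Int) : pvMatMul X (1, 0, 0, 1) = X := by
  obtain ⟨a, b, c, d⟩ := X; simp [pvMatMul]


theorem pvMPow_add (M : Int × Int × Int × Int) (m n : Nat) :
    pvMPow M (m + n) = pvMatMul (pvMPow M m) (pvMPow M n) := by
  induction m with
  | zero =>
    simp only [Nat.zero_add, pvMPow]
    obtain ⟨a, b, c, d⟩ := pvMPow M n; simp [pvMatMul]
  | succ m ih =>
    have : m + 1 + n = (m + n) + 1 := by omega
    rw [this]; simp only [pvMPow]; rw [ih, ← pvMatMul_assoc]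

theorem pvMPow_sq (M : Int × Int × Int × Int) (k : Nat) :
    pvMPow (pvMatMul M M) k = pvMPow M (2 * k) := by
  induction k with
  | zero => simp [pvMPow]
  | succ k ih =>
    have : 2 * (k + 1) = (2 * k) + 1 + 1 := by omega
    rw [this]; simp only [pvMPow]; rw [ih, ← pvMatMul_assoc]

theorem pvPowLoop_eq (R M : Int × Int × Int × Int) (n : Nat) :
    pvPowLoop R M n = pvMatMul R (pvMPow M n) := by
  induction n using Nat.strong_induction_on generalizing R M with
  | _ n ih =>
    rw [pvPowLoop]
    by_cases h0 : n = 0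
    · simp [h0, pvMPow, pvMatMul_one]
    · simp only [h0, if_false]
      rw [ih (n / 2) (by omega)]
      rw [pvMPow_sq]
      by_cases h1 : n % 2 = 1
      · simp only [h1, if_true]
        have hn : n = 1 + 2 * (n / 2) := by omega
        rw [pvMatMul_assoc]
        conv_rhs => rw [hn]
        rw [pvMPow_add]
        congr 1
        simp [pvMPow, pvMatMul_one]
      · simp only [h1, if_false]
        have hn : 2 * (n / 2) = n := by omega
        rw [hn]

-- the Pell pair read off from the matrix power
theorem pvMPow_pell (n : Nat) :
    ((pvMPow (1, 2, 1, 1) n).1 + (pvMPow (1, 2, 1, 1) n).2.1,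
     (pvMPow (1, 2, 1, 1) n).2.2.1 + (pvMPow (1, 2, 1, 1) n).2.2.2) = pvPell n := by
  induction n with
  | zero => simp [pvMPow, pvPell]
  | succ n ih =>
    have h1 := congrArg Prod.fst ih
    have h2 := congrArg Prod.snd ih
    simp only at h1 h2
    simp only [pvMPow, pvPell, pvMatMul]
    refine Prod.ext ?_ ?_ <;> simp only <;> [rw [← h1, ← h2]; rw [← h1, ← h2]] <;> ring

-- A's loop state after k ≥ 1 iterations is (P, P, Q, Q) for (P, Q) = pvPell k
def pvStepA (st : Int × Int × Int × Int) : Int × Int × Int × Int :=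
  let pold := st.1; let qold := st.2.2.1
  let pnew := pold + 2 * qold
  let qnew := pold + qold
  (pnew, pnew, qnew, qnew)

theorem pvFoldA (k : Nat) (hk : 1 ≤ k) :
    (List.range k).foldl (fun st (_ : Nat) => pvStepA st) ((1 : Int), (0 : Int), (1 : Int), (0 : Int)) =
      ((pvPell k).1, (pvPell k).1, (pvPell k).2, (pvPell k).2) := by
  induction k with
  | zero => omega
  | succ k ih =>
    rw [List.range_succ, List.foldl_append]
    by_cases hk1 : 1 ≤ k
    · rw [ih hk1]
      simp [pvStepA, pvPell]
    · have : k = 0 := by omega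
      subst this
      decide

theorem pvOne_mul (X : Int × Int × Int × Int) : pvMatMul (1, 0, 0, 1) X = X := by
  obtain ⟨a, b, c, d⟩ := X; simp [pvMatMul]

theorem sqrt2_spec : Claim_equal_sqrt2 := by
  intro its prec _ hpre
  unfold Pre_sqrt2 at hpre
  unfold Spec_sqrt2 sqrt2 sqrt2_alt
  have hn : 1 ≤ its.toNat := by omega
  rw [PySem.List.pyRange_one, List.foldl_map]
  have hsub : (its - 0).toNat = its.toNat := by omega
  rw [hsub]
  have hA : (List.range its.toNat).foldl
      (fun (st : Int × Int × Int × Int) (_ : Nat) =>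
        let pold := st.1; let qold := st.2.2.1
        let pnew := pold + 2 * qold
        let qnew := pold + qold
        (pnew, pnew, qnew, qnew)) (1, 0, 1, 0) =
      ((pvPell its.toNat).1, (pvPell its.toNat).1, (pvPell its.toNat).2, (pvPell its.toNat).2) :=
    pvFoldA its.toNat hn
  have hp := congrArg Prod.fst (pvMPow_pell its.toNat)
  have hq := congrArg Prod.snd (pvMPow_pell its.toNat)
  simp only at hp hq
  simp only [hA, pvPowLoop_eq, pvOne_mul]
  rw [hp, hq]
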